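-- pv_equiv track=rewrite | github.com/KonshinAV/SKIB_AV | utils/sqltools.py | KscExtendedStatusAsSList
-- ===== SOURCE A (Python) =====
-- def KscExtendedStatusAsSList (key_int_status):
--     key_bin_status = list(bin(key_int_status).split('b')[1][::-1])
--     key_list_status = []
--     dict_host_key_status = {}
--     for i in range(len(key_bin_status)):dict_host_key_status.update({i: key_bin_status[i]})
--     dict_extended_key_str_status = {0: 'Host with Network Agent installed is online but network agent is inactive',
--                                     1: 'Anti-virus application is installed but real-time protection is not running',
--                                     2: 'Anti-virus application is installed but not running',
--                                     3: 'Number of viruses detected is too much',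
--                                     4: 'Anti-virus application is installed but real-time protection status differs from one set by the security administrator',
--                                     5: 'Anti-virus application is not installed',
--                                     6: 'Full scan for viruses performed too long ago',
--                                     7: 'Anti-virus bases were updated too long ago',
--                                     8: 'Network agent is inactive too long',
--                                     9: 'Old license',
--                                     10: 'Number of uncured objects is too much',
--                                     11: 'Reboot is required',
--                                     12: 'Incompatible applications are installed on the computer',
--                                     13: 'There is at least one unfixed vulnerability on the computer',
--                                     14: 'Search for Windows updates has not been launched for a long time',
--                                     15: 'Encryption status is not compliant',
--                                     16: 'Mobile device settings are not compliant',
--                                     17: 'There is at least one unprocessed incident',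
--                                     18: '18 Status Code',
--                                     19: 'The device is running out of disk space'
--                                     }
--     for bit in dict_host_key_status:
--         if dict_host_key_status[bit] == '1':
--             key_list_status.append(dict_extended_key_str_status[bit])
--     return key_list_status
-- ===== SOURCE B (Python) =====
-- _MESSAGES = ['Host with Network Agent installed is online but network agent is inactive',
--              'Anti-virus application is installed but real-time protection is not running',
--              'Anti-virus application is installed but not running',
--              'Number of viruses detected is too much',
--              'Anti-virus application is installed but real-time protection status differs from one set by the security administrator',
--              'Anti-virus application is not installed',
--              'Full scan for viruses performed too long ago',
--              'Anti-virus bases were updated too long ago',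
--              'Network agent is inactive too long',
--              'Old license',
--              'Number of uncured objects is too much',
--              'Reboot is required',
--              'Incompatible applications are installed on the computer',
--              'There is at least one unfixed vulnerability on the computer',
--              'Search for Windows updates has not been launched for a long time',
--              'Encryption status is not compliant',
--              'Mobile device settings are not compliant',
--              'There is at least one unprocessed incident',
--              '18 Status Code',
--              'The device is running out of disk space']
--
--
-- def KscExtendedStatusAsSList(key_int_status):
--     # Pure arithmetic over the magnitude: no binary string, no dicts.
--     out = []
--     n = abs(key_int_status)
--     i = 0
--     while n:
--         if n & 1:
--             out.append(_MESSAGES[i])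
--         n >>= 1
--         i += 1
--     return out
-- ===== Notes on version B (the rewrite author's own statement) =====
-- stated objective: simpler
-- what changed: B replaces A's binary-string formatting, the index->char dict rebuilt by a range loop, and the dict-key scan by a single arithmetic loop over abs(key_int_status) that shifts out one bit at a time and appends the i-th message when the low bit is set.
import Mathlib
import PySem

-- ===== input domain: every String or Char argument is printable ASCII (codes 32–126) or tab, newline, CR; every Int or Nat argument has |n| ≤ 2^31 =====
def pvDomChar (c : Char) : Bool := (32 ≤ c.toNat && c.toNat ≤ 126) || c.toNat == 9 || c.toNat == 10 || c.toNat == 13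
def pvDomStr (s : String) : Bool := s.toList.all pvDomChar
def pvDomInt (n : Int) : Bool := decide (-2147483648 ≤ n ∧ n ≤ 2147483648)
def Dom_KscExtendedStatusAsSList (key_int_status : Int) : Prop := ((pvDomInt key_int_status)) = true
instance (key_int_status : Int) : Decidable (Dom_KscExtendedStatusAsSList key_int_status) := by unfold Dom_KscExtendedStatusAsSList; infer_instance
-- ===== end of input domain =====

-- B replaces A's binary-string/dict machinery by one arithmetic loop over |n| (objective: simpler; return value only, no mutation).

-- ===== PORT A =====
-- bin(k).split('b')[1]: the binary digits of |k|, most significant first ('0' for k = 0).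
-- Hand-ported (PySem has no bin()); exact: bin() prints the magnitude, the '-' sign lands before the 'b'.
def pvBinCore : Nat → List Char
  | 0 => []
  | n + 1 => pvBinCore ((n + 1) / 2) ++ [if (n + 1) % 2 = 1 then '1' else '0']
decreasing_by exact Nat.div_lt_self (Nat.succ_pos n) (by omega)

def pvExtDict : PySem.Dict Int String := PySem.Dict.ofList
  [(0, "Host with Network Agent installed is online but network agent is inactive"),
   (1, "Anti-virus application is installed but real-time protection is not running"),
   (2, "Anti-virus application is installed but not running"),
   (3, "Number of viruses detected is too much"),
   (4, "Anti-virus application is installed but real-time protection status differs from one set by the security administrator"),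
   (5, "Anti-virus application is not installed"),
   (6, "Full scan for viruses performed too long ago"),
   (7, "Anti-virus bases were updated too long ago"),
   (8, "Network agent is inactive too long"),
   (9, "Old license"),
   (10, "Number of uncured objects is too much"),
   (11, "Reboot is required"),
   (12, "Incompatible applications are installed on the computer"),
   (13, "There is at least one unfixed vulnerability on the computer"),
   (14, "Search for Windows updates has not been launched for a long time"),
   (15, "Encryption status is not compliant"),
   (16, "Mobile device settings are not compliant"),
   (17, "There is at least one unprocessed incident"),
   (18, "18 Status Code"),
   (19, "The device is running out of disk space")]

def KscExtendedStatusAsSList (key_int_status : Int) : List String :=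
  -- key_bin_status = list(bin(key_int_status).split('b')[1][::-1])
  let key_bin_status : List Char :=
    (if key_int_status.natAbs = 0 then ['0'] else pvBinCore key_int_status.natAbs).reverse
  -- for i in range(len(key_bin_status)): dict_host_key_status.update({i: key_bin_status[i]})
  let dict_host_key_status : PySem.Dict Int Char :=
    (PySem.List.pyRange 0 (key_bin_status.length : Int) 1).foldl
      (fun d i => d.insert i (PySem.List.pyGetD key_bin_status i ' ')) PySem.Dict.empty
  -- for bit in dict_host_key_status: if dict_host_key_status[bit] == '1': append(dict_extended[bit])
  -- both [bit] lookups ported as getD; dict_host always contains bit; dict_extended[bit] raises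
  -- KeyError for bit ≥ 20, which Pre_ excludes.
  (dict_host_key_status.keys).foldl
    (fun acc bit =>
      if dict_host_key_status.getD bit ' ' == '1' then acc ++ [pvExtDict.getD bit ""] else acc)
    []

-- ===== PORT B =====
def pvMessages : List String :=
  ["Host with Network Agent installed is online but network agent is inactive",
   "Anti-virus application is installed but real-time protection is not running",
   "Anti-virus application is installed but not running",
   "Number of viruses detected is too much",
   "Anti-virus application is installed but real-time protection status differs from one set by the security administrator",
   "Anti-virus application is not installed",
   "Full scan for viruses performed too long ago",
   "Anti-virus bases were updated too long ago",
   "Network agent is inactive too long",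
   "Old license",
   "Number of uncured objects is too much",
   "Reboot is required",
   "Incompatible applications are installed on the computer",
   "There is at least one unfixed vulnerability on the computer",
   "Search for Windows updates has not been launched for a long time",
   "Encryption status is not compliant",
   "Mobile device settings are not compliant",
   "There is at least one unprocessed incident",
   "18 Status Code",
   "The device is running out of disk space"]

-- while n: if n & 1: out.append(_MESSAGES[i]); n >>= 1; i += 1
-- _MESSAGES[i] raises IndexError for i ≥ 20 (Pre_ excludes); getD is its total form.
def pvAltGo : Nat → Nat → List String
  | 0, _ => []
  | n + 1, i =>
    (if (n + 1) % 2 = 1 then [pvMessages.getD i ""] else []) ++ pvAltGo ((n + 1) / 2) (i + 1)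
decreasing_by exact Nat.div_lt_self (Nat.succ_pos n) (by omega)

def KscExtendedStatusAsSList_alt (key_int_status : Int) : List String :=
  pvAltGo key_int_status.natAbs 0

-- ===== PRECONDITION & SPEC =====
-- Pre_ excludes exactly the inputs with a set bit at position ≥ 20 (|n| ≥ 2^20), on which
-- A raises KeyError (and B raises IndexError): neither program returns there.
def Pre_KscExtendedStatusAsSList (key_int_status : Int) : Prop := key_int_status.natAbs < 1048576
instance (key_int_status : Int) : Decidable (Pre_KscExtendedStatusAsSList key_int_status) := by unfold Pre_KscExtendedStatusAsSList; infer_instance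

def pvWitness_KscExtendedStatusAsSList : Int := 5

def Spec_KscExtendedStatusAsSList (key_int_status : Int) (out : List String) : Prop := out = KscExtendedStatusAsSList_alt key_int_status
instance (key_int_status : Int) (out : List String) : Decidable (Spec_KscExtendedStatusAsSList key_int_status out) := by unfold Spec_KscExtendedStatusAsSList; infer_instance

-- ===== CLAIM (what is proved, stated in full; the proofs are below) =====
def Claim_equal_KscExtendedStatusAsSList : Prop := ∀ (key_int_status : Int), Dom_KscExtendedStatusAsSList key_int_status → Pre_KscExtendedStatusAsSList key_int_status → Spec_KscExtendedStatusAsSList key_int_status (KscExtendedStatusAsSList key_int_status)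

-- ===== LEMMAS AND PROOFS =====

-- binary digits of m, least significant first (the reverse of what bin prints)
def pvDigits : Nat → List Char
  | 0 => []
  | n + 1 => (if (n + 1) % 2 = 1 then '1' else '0') :: pvDigits ((n + 1) / 2)
decreasing_by exact Nat.div_lt_self (Nat.succ_pos n) (by omega)

lemma pvBinCore_reverse : ∀ m : Nat, (pvBinCore m).reverse = pvDigits m := by
  intro m
  induction m using Nat.strong_induction_on with
  | _ m ih =>
    match m with
    | 0 => simp [pvBinCore, pvDigits]
    | n + 1 =>
      rw [pvBinCore, pvDigits, List.reverse_append, List.reverse_singleton]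
      simp [ih ((n + 1) / 2) (Nat.div_lt_self (Nat.succ_pos n) (by omega))]

lemma pvDigits_length_le : ∀ (L m : Nat), m < 2 ^ L → (pvDigits m).length ≤ L := by
  intro L
  induction L with
  | zero => intro m h; interval_cases m; simp [pvDigits]
  | succ L ih =>
    intro m h
    match m with
    | 0 => simp [pvDigits]
    | n + 1 =>
      rw [pvDigits]
      have h2 : 2 ^ (L + 1) = 2 * 2 ^ L := by ring
      have := ih ((n + 1) / 2) (by omega)
      simpa using this

-- the guarded collector the A-side index loop computes
def pvCollect : List Char → (Nat → String) → List String
  | [], _ => []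
  | c :: cs, g => (if c == '1' then [g 0] else []) ++ pvCollect cs (fun j => g (j + 1))

lemma pvCollect_foldl : ∀ (cs : List Char) (g : Nat → String) (acc : List String),
    (List.range cs.length).foldl
      (fun acc j => if cs.getD j ' ' == '1' then acc ++ [g j] else acc) acc
  = acc ++ pvCollect cs g := by
  intro cs
  induction cs with
  | nil => intro g acc; simp [pvCollect]
  | cons c cs ih =>
    intro g acc
    rw [List.length_cons, List.range_succ_eq_map, List.foldl_cons, List.foldl_map]
    simp only [List.getD_cons_succ, List.getD_cons_zero]
    rw [ih (fun j => g (j + 1))]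
    by_cases h : c == '1' <;> simp [pvCollect, h]

lemma pvExt_eq_messages : ∀ i : Nat, i < 20 → pvExtDict.getD (i : Int) "" = pvMessages.getD i "" := by
  decide

lemma pvCollect_digits : ∀ (m i : Nat), i + (pvDigits m).length ≤ 20 →
    pvCollect (pvDigits m) (fun j => pvExtDict.getD ((i + j : Nat) : Int) "") = pvAltGo m i := by
  intro m
  induction m using Nat.strong_induction_on with
  | _ m ih =>
    match m with
    | 0 => intro i _; simp [pvDigits, pvCollect, pvAltGo]
    | n + 1 =>
      intro i hlen
      rw [pvDigits] at hlen ⊢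
      rw [pvCollect, pvAltGo]
      have hrec := ih ((n + 1) / 2) (Nat.div_lt_self (Nat.succ_pos n) (by omega)) (i + 1)
        (by simp only [List.length_cons] at hlen; omega)
      have harg : (fun j => pvExtDict.getD ((i + (j + 1) : Nat) : Int) "")
                = (fun j => pvExtDict.getD ((i + 1 + j : Nat) : Int) "") := by
        funext j; ring_nf
      rw [harg, hrec]
      have hi : i < 20 := by simp at hlen; omega
      have := pvExt_eq_messages i hi
      by_cases hb : (n + 1) % 2 = 1 <;> simp [hb, this]

-- A's whole body, reduced to the collector over the LSB-first digits
lemma pvA_eq_collect (k : Int) :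
    KscExtendedStatusAsSList k
  = pvCollect ((if k.natAbs = 0 then ['0'] else pvBinCore k.natAbs).reverse)
      (fun j => pvExtDict.getD ((j : Nat) : Int) "") := by
  unfold KscExtendedStatusAsSList
  dsimp only
  set cs := (if k.natAbs = 0 then ['0'] else pvBinCore k.natAbs).reverse with hcs
  have hfresh : ∀ a ∈ PySem.List.pyRange 0 (cs.length : Int) 1,
      (PySem.Dict.empty : PySem.Dict Int Char).contains a = false := by
    intro a _; simp [pysem]
  have hnd : ((PySem.List.pyRange 0 (cs.length : Int) 1).map (fun a => a)).Nodup := by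
    simpa using PySem.List.nodup_pyRange_one 0 (cs.length : Int)
  have hitems :
      ((PySem.List.pyRange 0 (cs.length : Int) 1).foldl
        (fun d i => d.insert i (PySem.List.pyGetD cs i ' ')) PySem.Dict.empty).items
      = (PySem.List.pyRange 0 (cs.length : Int) 1).map
          (fun i => (i, PySem.List.pyGetD cs i ' ')) := by
    simpa using PySem.Dict.items_foldl_insert_fresh
      (l := PySem.List.pyRange 0 (cs.length : Int) 1) (k := fun a => a)
      (v := fun a => PySem.List.pyGetD cs a ' ') (d := PySem.Dict.empty) hfresh hnd
  set d := (PySem.List.pyRange 0 (cs.length : Int) 1).foldl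
      (fun d i => d.insert i (PySem.List.pyGetD cs i ' ')) PySem.Dict.empty with hd
  have hndk : d.keys.Nodup := by
    simp only [PySem.Dict.keys, hitems, List.map_map]
    simpa [Function.comp_def] using PySem.List.nodup_pyRange_one 0 (cs.length : Int)
  have hget : ∀ i ∈ PySem.List.pyRange 0 (cs.length : Int) 1,
      d.getD i ' ' = PySem.List.pyGetD cs i ' ' := by
    intro i hi
    exact PySem.Dict.getD_of_mem_items d
      (by rw [hitems]; exact List.mem_map.mpr ⟨i, hi, rfl⟩) hndk ' '
  have hkeys : d.keys = PySem.List.pyRange 0 (cs.length : Int) 1 := by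
    simp only [PySem.Dict.keys, hitems, List.map_map]
    simp [Function.comp_def]
  rw [hkeys]
  rw [PySem.List.foldl_congr_mem (PySem.List.pyRange 0 (cs.length : Int) 1)
      (fun acc bit => if d.getD bit ' ' == '1' then acc ++ [pvExtDict.getD bit ""] else acc)
      (fun acc i => if PySem.List.pyGetD cs i ' ' == '1' then acc ++ [pvExtDict.getD i ""] else acc)
      [] (by intro acc i hi; dsimp only; rw [hget i hi])]
  rw [PySem.List.pyRange_one, List.foldl_map]
  have hlen : ((cs.length : Int) - 0).toNat = cs.length := by simp
  rw [hlen]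
  have : (fun (acc : List String) (k : Nat) =>
      if PySem.List.pyGetD cs ((0 : Int) + (k : Int)) ' ' == '1'
      then acc ++ [pvExtDict.getD ((0 : Int) + (k : Int)) ""] else acc)
      = fun acc k => if cs.getD k ' ' == '1' then acc ++ [pvExtDict.getD ((k : Nat) : Int) ""] else acc := by
    funext acc k; simp [pysem]
  rw [this, pvCollect_foldl]
  simp

-- ===== VERDICT (by name: the statement is the Claim_ definition above) =====
theorem KscExtendedStatusAsSList_spec : Claim_equal_KscExtendedStatusAsSList := by
  intro k _ hpre
  unfold Spec_KscExtendedStatusAsSList KscExtendedStatusAsSList_alt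
  rw [pvA_eq_collect]
  by_cases h0 : k.natAbs = 0
  · rw [h0]; simp [pvCollect, pvAltGo]
  · rw [if_neg h0, pvBinCore_reverse]
    have hlen : (pvDigits k.natAbs).length ≤ 20 :=
      pvDigits_length_le 20 k.natAbs (by unfold Pre_KscExtendedStatusAsSList at hpre; omega)
    have := pvCollect_digits k.natAbs 0 (by omega)
    simpa using this
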